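-- pv_equiv track=rewrite | github.com/Lucasfeel/endingsignal | scripts/backfill_naver_series_only.py | _strip_sources_args
-- ===== SOURCE A (Python) =====
-- from typing import List, Sequence
--
-- def _strip_sources_args(args: Sequence[str]) -> List[str]:
--     cleaned: List[str] = []
--     idx = 0
--     while idx < len(args):
--         token = str(args[idx])
--         if token == "--sources":
--             idx += 1
--             if idx < len(args) and not str(args[idx]).startswith("--"):
--                 idx += 1
--             continue
--         if token.startswith("--sources="):
--             idx += 1
--             continue
--         cleaned.append(token)
--         idx += 1
--     return cleaned
-- ===== SOURCE B (Python) =====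
-- from typing import List, Sequence
--
-- def _strip_sources_args(args: Sequence[str]) -> List[str]:
--     # A token is removed iff it is "--sources", starts with "--sources=", or is a
--     # value (doesn't start with "--") whose immediate predecessor is "--sources".
--     # This local rule is exact because a "--sources" token can never itself be
--     # consumed as a value (values never start with "--").
--     toks = [str(a) for a in args]
--     return [t for p, t in zip([None] + toks, toks)
--             if t != "--sources"
--             and not t.startswith("--sources=")
--             and not (p == "--sources" and not t.startswith("--"))]
-- ===== Notes on version B (the rewrite author's own statement) =====
-- stated objective: alternative
-- what changed: Replaces A's stateful index-based while loop with lookahead by a stateless pairwise filter: each token is zipped with its immediate predecessor and kept or dropped by a purely local predicate, correct because a "--sources" token can never itself be consumed as a value (values never start with "--").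
import Mathlib
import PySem

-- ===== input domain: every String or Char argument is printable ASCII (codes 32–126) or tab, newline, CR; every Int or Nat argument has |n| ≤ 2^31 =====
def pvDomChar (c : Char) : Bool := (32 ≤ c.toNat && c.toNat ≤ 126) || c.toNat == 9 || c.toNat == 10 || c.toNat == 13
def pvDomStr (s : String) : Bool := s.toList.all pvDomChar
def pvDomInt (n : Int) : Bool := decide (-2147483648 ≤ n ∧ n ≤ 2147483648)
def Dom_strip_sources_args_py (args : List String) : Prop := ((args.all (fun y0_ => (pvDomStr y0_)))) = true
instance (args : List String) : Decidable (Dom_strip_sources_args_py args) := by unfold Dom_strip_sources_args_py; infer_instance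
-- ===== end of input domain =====

-- B replaces A's stateful index/lookahead scan by a stateless filter over (predecessor, token) pairs (alternative decomposition, same cost).

-- ===== PORT A =====
-- A's while loop over idx: processing the suffix args[idx:]; a bare "--sources" peeks at the next token.
def strip_sources_args_py (args : List String) : List String :=
  match args with
  | [] => []
  | t :: rest =>
    if t == "--sources" then
      match rest with
      | [] => []
      | r :: rest' =>
        if !(PySem.Str.startswith r "--") then strip_sources_args_py rest'
        else strip_sources_args_py (r :: rest')
    else if PySem.Str.startswith t "--sources=" then strip_sources_args_py rest
    else t :: strip_sources_args_py rest

-- ===== PORT B =====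
-- B's local keep-predicate on a (predecessor, token) pair
def keepB (p : Option String) (t : String) : Bool :=
  !(t == "--sources") && !(PySem.Str.startswith t "--sources=")
    && !((p == some "--sources") && !(PySem.Str.startswith t "--"))

-- zip([None] + toks, toks) in Python: zip truncates to the shorter list
def strip_sources_args_py_alt (args : List String) : List String :=
  (((none :: args.map some).zip args).filter (fun pt => keepB pt.1 pt.2)).map Prod.snd

-- ===== PRECONDITION & SPEC =====
def Spec_strip_sources_args_py (args : List String) (out : List String) : Prop := out = strip_sources_args_py_alt args
instance (args : List String) (out : List String) : Decidable (Spec_strip_sources_args_py args out) := by unfold Spec_strip_sources_args_py; infer_instance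

-- ===== CLAIM (what is proved, stated in full; the proofs are below) =====
def Claim_equal_strip_sources_args_py : Prop := ∀ (args : List String), Dom_strip_sources_args_py args → Spec_strip_sources_args_py args (strip_sources_args_py args)

-- ===== LEMMAS AND PROOFS =====

-- B's filter started at an arbitrary predecessor p (generalisation for the induction)
def altFrom (p : Option String) (args : List String) : List String :=
  (((p :: args.map some).zip args).filter (fun pt => keepB pt.1 pt.2)).map Prod.snd

theorem altFrom_nil (p : Option String) : altFrom p [] = [] := by
  simp [altFrom]

theorem altFrom_cons (p : Option String) (t : String) (rest : List String) :
    altFrom p (t :: rest)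
      = (if keepB p t then [t] else []) ++ altFrom (some t) rest := by
  by_cases h : keepB p t = true <;> simp [altFrom, h]

-- what A computes when it has just consumed a bare "--sources" (the pending state)
def stripAPend (args : List String) : List String :=
  match args with
  | [] => []
  | r :: rest' =>
    if !(PySem.Str.startswith r "--") then strip_sources_args_py rest'
    else strip_sources_args_py (r :: rest')

theorem A_sources (rest : List String) :
    strip_sources_args_py ("--sources" :: rest) = stripAPend rest := by
  cases rest <;> simp [strip_sources_args_py, stripAPend]

theorem A_drop (t : String) (rest : List String) (hs : t ≠ "--sources")
    (hp : PySem.Str.startswith t "--sources=" = true) :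
    strip_sources_args_py (t :: rest) = strip_sources_args_py rest := by
  simp at hp
  cases rest <;> simp [strip_sources_args_py, hs, hp]

theorem A_keep (t : String) (rest : List String) (hs : t ≠ "--sources")
    (hp : PySem.Str.startswith t "--sources=" = false) :
    strip_sources_args_py (t :: rest) = t :: strip_sources_args_py rest := by
  simp at hp
  cases rest <;> simp [strip_sources_args_py, hs, hp]

-- "--sources=" prefix forces the "--" prefix and rules out equality with "--sources"
theorem sw_srcEq_sw_dash (t : String)
    (hp : PySem.Str.startswith t "--sources=" = true) :
    PySem.Str.startswith t "--" = true := by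
  rw [PySem.Str.startswith_eq] at hp ⊢
  rw [PySem.Chars.startswith_iff] at hp ⊢
  exact List.IsPrefix.trans (by decide) hp

theorem sources_sw_dash : PySem.Str.startswith "--sources" "--" = true := by decide

-- main invariant: altFrom tracks A, in both the normal and the pending state
theorem altFrom_eq (args : List String) :
    (∀ p : Option String, p ≠ some "--sources" →
        altFrom p args = strip_sources_args_py args) ∧
    (altFrom (some "--sources") args = stripAPend args) := by
  induction args with
  | nil => constructor <;> simp [altFrom_nil, strip_sources_args_py, stripAPend]
  | cons t rest ih =>
    have hnorm : ∀ p : Option String, p ≠ some "--sources" →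
        altFrom p (t :: rest) = strip_sources_args_py (t :: rest) := by
      intro p hp
      rw [altFrom_cons]
      by_cases hs : t = "--sources"
      · subst hs
        rw [show keepB p "--sources" = false by simp [keepB], A_sources]
        simpa using ih.2
      · by_cases hsw : PySem.Str.startswith t "--sources=" = true
        · have hsw' := hsw; simp at hsw'
          rw [show keepB p t = false by simp [keepB, hsw'], A_drop t rest hs hsw]
          simpa using ih.1 (some t) (by simpa using hs)
        · have hsw0 : PySem.Str.startswith t "--sources=" = false := by simpa using hsw
          have hsw0' := hsw0; simp at hsw0'
          rw [show keepB p t = true by simp [keepB, hs, hsw0', hp],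
              A_keep t rest hs hsw0]
          simpa using ih.1 (some t) (by simpa using hs)
    refine ⟨hnorm, ?_⟩
    rw [altFrom_cons]
    by_cases hd : PySem.Str.startswith t "--" = true
    · have hd' := hd; simp at hd'
      have hAp : stripAPend (t :: rest) = strip_sources_args_py (t :: rest) := by
        simp [stripAPend, hd']
      rw [hAp]
      by_cases hs : t = "--sources"
      · subst hs
        rw [show keepB (some "--sources") "--sources" = false by simp [keepB],
            A_sources]
        simpa using ih.2
      · by_cases hsw : PySem.Str.startswith t "--sources=" = true
        · have hsw' := hsw; simp at hsw'
          rw [show keepB (some "--sources") t = false by simp [keepB, hsw'],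
              A_drop t rest hs hsw]
          simpa using ih.1 (some t) (by simpa using hs)
        · have hsw0 : PySem.Str.startswith t "--sources=" = false := by simpa using hsw
          have hsw0' := hsw0; simp at hsw0'
          rw [show keepB (some "--sources") t = true by
                simp [keepB, hs, hsw0', hd'],
              A_keep t rest hs hsw0]
          simpa using ih.1 (some t) (by simpa using hs)
    · have hd0 : PySem.Str.startswith t "--" = false := by simpa using hd
      have hs : t ≠ "--sources" := by
        intro h; subst h; rw [sources_sw_dash] at hd0; cases hd0
      have hsw0 : PySem.Str.startswith t "--sources=" = false := by
        by_contra h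
        have := sw_srcEq_sw_dash t (by simpa using h)
        rw [hd0] at this; cases this
      have hd0' := hd0; simp at hd0'
      rw [show keepB (some "--sources") t = false by simp [keepB, hd0'],
          show stripAPend (t :: rest) = strip_sources_args_py rest by
            simp [stripAPend, hd0']]
      simpa using ih.1 (some t) (by simpa using hs)

-- ===== VERDICT (by name: the statement is the Claim_ definition above) =====
theorem strip_sources_args_py_spec : Claim_equal_strip_sources_args_py := by
  intro args _
  unfold Spec_strip_sources_args_py strip_sources_args_py_alt
  exact ((altFrom_eq args).1 none (by simp)).symm
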